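-- pv_equiv track=rewrite | github.com/nicolas-forquet/elan | ELAN/mla_model/MIG_TOOLBOX.py | COMPLETE_STUDY_PERIOD
-- ===== SOURCE A (Python) =====
-- def COMPLETE_STUDY_PERIOD(time, full_study_period, flow, value):
--     flow_study_period = [value] * len(
--         full_study_period
--     )  # This list will be filled with the 'value' during the full_study_period
--
--     if type(value) == int or type(value) == float:
--         for i in range(len(full_study_period)):
--             for j in range(len(time)):
--                 if full_study_period[i] == time[j]:
--                     flow_study_period[i] = flow_study_period[i] + flow[j]
--     else:
--         for i in range(len(full_study_period)):
--             for j in range(len(time)):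
--                 if full_study_period[i] == time[j]:
--                     flow_study_period[i] = flow[j]
--
--     return flow_study_period
-- ===== SOURCE B (Python) =====
-- def COMPLETE_STUDY_PERIOD(time, full_study_period, flow, value):
--     if type(value) == int or type(value) == float:
--         sums = {}
--         for t, f in zip(time, flow):
--             sums[t] = sums.get(t, 0) + f
--         return [value + sums.get(t, 0) for t in full_study_period]
--     else:
--         last = {}
--         for t, f in zip(time, flow):
--             last[t] = f
--         return [last.get(t, value) for t in full_study_period]
-- ===== Notes on version B (the rewrite author's own statement) =====
-- stated objective: faster
-- what changed: Replaces A's nested scan (for each study-period entry, scan all of time) by one pass over zip(time, flow) building a dict of per-time flow sums, then a single dict lookup per study-period entry.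
import Mathlib
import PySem

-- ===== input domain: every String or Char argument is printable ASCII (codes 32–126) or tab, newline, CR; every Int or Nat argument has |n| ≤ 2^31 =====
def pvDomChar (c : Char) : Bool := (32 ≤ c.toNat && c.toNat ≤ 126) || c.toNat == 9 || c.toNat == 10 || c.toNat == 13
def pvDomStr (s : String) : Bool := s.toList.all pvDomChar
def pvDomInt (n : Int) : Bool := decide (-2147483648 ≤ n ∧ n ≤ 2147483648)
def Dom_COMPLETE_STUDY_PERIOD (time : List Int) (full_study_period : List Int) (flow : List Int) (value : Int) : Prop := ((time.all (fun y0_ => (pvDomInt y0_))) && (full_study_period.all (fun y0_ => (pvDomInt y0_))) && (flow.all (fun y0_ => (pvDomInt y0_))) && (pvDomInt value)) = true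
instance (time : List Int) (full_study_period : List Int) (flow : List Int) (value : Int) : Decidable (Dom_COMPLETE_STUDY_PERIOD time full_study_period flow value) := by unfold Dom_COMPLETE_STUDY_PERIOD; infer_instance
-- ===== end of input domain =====

-- B replaces A's nested scan by a one-pass dictionary of per-time flow sums, then one lookup per
-- study-period entry (objective: faster, O(n*m) → O(n+m) dictionary passes).

-- ===== PORT A =====
-- Literal transliteration of A. value : Int, so Python's `type(value) == int` test is always true and
-- only the accumulating branch is reachable. Loop indices i, j are nonnegative and within bounds by
-- the range() loop, so `getD _ 0` is exact there; `flow[j]` can be out of range in Python (IndexError),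
-- excluded by Pre_ below.
def COMPLETE_STUDY_PERIOD (time : List Int) (full_study_period : List Int) (flow : List Int) (value : Int) : List Int :=
  let flow_study_period := List.replicate full_study_period.length value
  (List.range full_study_period.length).foldl (fun acc i =>
    (List.range time.length).foldl (fun acc2 j =>
      if full_study_period.getD i 0 = time.getD j 0 then
        acc2.set i (acc2.getD i 0 + flow.getD j 0)
      else acc2) acc) flow_study_period

-- ===== PORT B =====
-- Literal transliteration of Source B (numeric branch; value : Int so the type test is always true).
def COMPLETE_STUDY_PERIOD_alt (time : List Int) (full_study_period : List Int) (flow : List Int) (value : Int) : List Int :=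
  let sums : PySem.Dict Int Int :=
    (time.zip flow).foldl (fun d p => d.modify p.1 0 (· + p.2)) PySem.Dict.empty
  full_study_period.map (fun t => value + sums.getD t 0)

-- ===== PRECONDITION & SPEC =====
-- Pre_ excludes exactly the inputs where A raises IndexError: some time entry at a position ≥ len(flow)
-- occurs in full_study_period (so A reads flow[j] out of range).
def Pre_COMPLETE_STUDY_PERIOD (time : List Int) (full_study_period : List Int) (flow : List Int) (value : Int) : Prop :=
  ∀ t ∈ time.drop flow.length, t ∉ full_study_period
instance (time : List Int) (full_study_period : List Int) (flow : List Int) (value : Int) : Decidable (Pre_COMPLETE_STUDY_PERIOD time full_study_period flow value) := by unfold Pre_COMPLETE_STUDY_PERIOD; infer_instance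

def pvWitness_COMPLETE_STUDY_PERIOD : List Int × List Int × List Int × Int := ([1, 2, 2], [0, 1, 2, 1], [10, 20, 30], 5)

def Spec_COMPLETE_STUDY_PERIOD (time : List Int) (full_study_period : List Int) (flow : List Int) (value : Int) (out : List Int) : Prop := out = COMPLETE_STUDY_PERIOD_alt time full_study_period flow value
instance (time : List Int) (full_study_period : List Int) (flow : List Int) (value : Int) (out : List Int) : Decidable (Spec_COMPLETE_STUDY_PERIOD time full_study_period flow value out) := by unfold Spec_COMPLETE_STUDY_PERIOD; infer_instance

-- ===== CLAIM (what is proved, stated in full; the proofs are below) =====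
def Claim_equal_COMPLETE_STUDY_PERIOD : Prop := ∀ (time : List Int) (full_study_period : List Int) (flow : List Int) (value : Int), Dom_COMPLETE_STUDY_PERIOD time full_study_period flow value → Pre_COMPLETE_STUDY_PERIOD time full_study_period flow value → Spec_COMPLETE_STUDY_PERIOD time full_study_period flow value (COMPLETE_STUDY_PERIOD time full_study_period flow value)

-- ===== LEMMAS AND PROOFS =====

-- B's dictionary entry for t is the sum of flows paired (by zip) with time value t.
theorem sumsDict_getD (l : List (Int × Int)) (d : PySem.Dict Int Int) (t : Int) :
    (l.foldl (fun d p => d.modify p.1 0 (· + p.2)) d).getD t 0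
      = d.getD t 0 + ((l.filter (fun p => p.1 == t)).map (fun p => p.2)).sum := by
  induction l generalizing d with
  | nil => simp
  | cons p l ih =>
    simp only [List.foldl_cons, ih, PySem.Dict.getD_modify, List.filter_cons]
    by_cases h : p.1 = t
    · simp [h, add_assoc]
    · simp [h, Ne.symm h]

-- A's inner loop over j only rewrites position i: it adds the matching-flow sum there.
theorem inner_loop (c : Nat → Prop) [DecidablePred c] (f : Nat → Int) :
    ∀ (js : List Nat) (acc : List Int) (i : Nat), i < acc.length →
    js.foldl (fun acc2 j => if c j then acc2.set i (acc2.getD i 0 + f j) else acc2) acc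
      = acc.set i (acc.getD i 0 + (js.map (fun j => if c j then f j else 0)).sum) := by
  intro js
  induction js with
  | nil =>
    intro acc i hi
    simp only [List.foldl_nil, List.map_nil, List.sum_nil, add_zero,
      List.getD_eq_getElem _ _ hi, List.set_getElem_self]
  | cons j js ih =>
    intro acc i hi
    simp only [List.foldl_cons, List.map_cons, List.sum_cons]
    by_cases hc : c j
    · rw [if_pos hc, ih _ i (by simpa using hi)]
      simp [List.getElem?_set_self (by simpa using hi), List.set_set, hc, add_assoc]
    · rw [if_neg hc, ih _ i hi]
      simp [hc]

-- A's outer loop: element k of the result, when the visited indices are distinct and in range.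
theorem outer_loop (g : Nat → Int) :
    ∀ (is_ : List Nat) (acc : List Int), is_.Nodup → (∀ i ∈ is_, i < acc.length) → ∀ (k : Nat),
    (is_.foldl (fun a i => a.set i (a.getD i 0 + g i)) acc)[k]?
      = if k ∈ is_ then some (acc.getD k 0 + g k) else acc[k]? := by
  intro is_
  induction is_ with
  | nil => intro acc _ _ k; simp
  | cons i is ih =>
    intro acc hnd hlt k
    simp only [List.nodup_cons] at hnd
    have hi : i < acc.length := hlt i (by simp)
    simp only [List.foldl_cons]
    rw [ih _ hnd.2 (by intro x hx; simpa using hlt x (by simp [hx])) k]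
    by_cases hk : k = i
    · subst hk
      simp [hnd.1, List.getElem?_set_self hi]
    · by_cases hmem : k ∈ is
      · simp [hmem, hk, List.getElem?_set_ne (fun h => hk h.symm)]
      · simp [hmem, hk, List.getElem?_set_ne (Ne.symm hk)]

-- Under Pre_, A's index-sum over range(len(time)) equals B's sum over zip(time, flow), for t ∈ fsp.
theorem sum_range_eq_sum_zip (fsp : List Int) :
    ∀ (time flow : List Int), (∀ t' ∈ time.drop flow.length, t' ∉ fsp) → ∀ t ∈ fsp,
    ((List.range time.length).map (fun j => if t = time.getD j 0 then flow.getD j 0 else 0)).sum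
      = (((time.zip flow).filter (fun p => p.1 == t)).map (fun p => p.2)).sum := by
  intro time
  induction time with
  | nil => intro flow _ t _; simp
  | cons a time ih =>
    intro flow hpre t ht
    cases flow with
    | nil =>
      -- flow is empty: every time entry is ∉ fsp, and flow.getD is 0 anyway
      simp only [List.zip_nil_right, List.filter_nil, List.map_nil, List.sum_nil]
      have : ∀ j : Nat, (if t = (a :: time).getD j 0 then ([] : List Int).getD j 0 else 0) = 0 := by
        intro j; simp [List.getD]
      simp [this]
    | cons b flow =>
      have hpre' : ∀ t' ∈ time.drop flow.length, t' ∉ fsp := by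
        intro t' ht'; exact hpre t' (by simpa using ht')
      have hrec := ih flow hpre' t ht
      rw [List.length_cons, List.range_succ_eq_map]
      simp only [List.map_cons, List.map_map, List.sum_cons, List.zip_cons_cons, List.filter_cons]
      have : ((List.range time.length).map
          ((fun j => if t = (a :: time).getD j 0 then (b :: flow).getD j 0 else 0) ∘ (· + 1))).sum
          = ((List.range time.length).map (fun j => if t = time.getD j 0 then flow.getD j 0 else 0)).sum := by
        apply congrArg; apply List.map_congr_left; intro j _; simp [List.getD]
      rw [this, hrec]
      by_cases h : a = t
      · simp [h, List.getD]
      · simp [h, Ne.symm h, List.getD]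

theorem COMPLETE_STUDY_PERIOD_eq (time full_study_period flow : List Int) (value : Int)
    (hpre : Pre_COMPLETE_STUDY_PERIOD time full_study_period flow value) :
    COMPLETE_STUDY_PERIOD time full_study_period flow value
      = COMPLETE_STUDY_PERIOD_alt time full_study_period flow value := by
  unfold COMPLETE_STUDY_PERIOD COMPLETE_STUDY_PERIOD_alt
  apply List.ext_getElem?
  intro k
  -- left side: rewrite the nested fold
  have hinner : ∀ (acc : List Int) (i : Nat), i < acc.length →
      (List.range time.length).foldl (fun acc2 j =>
        if full_study_period.getD i 0 = time.getD j 0 then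
          acc2.set i (acc2.getD i 0 + flow.getD j 0) else acc2) acc
      = acc.set i (acc.getD i 0 +
          ((List.range time.length).map (fun j =>
            if full_study_period.getD i 0 = time.getD j 0 then flow.getD j 0 else 0)).sum) := by
    intro acc i hi
    exact inner_loop (fun j => full_study_period.getD i 0 = time.getD j 0) (fun j => flow.getD j 0)
      (List.range time.length) acc i hi
  have hlen : ∀ (acc : List Int) (i : Nat),
      ((List.range time.length).foldl (fun acc2 j =>
        if full_study_period.getD i 0 = time.getD j 0 then
          acc2.set i (acc2.getD i 0 + flow.getD j 0) else acc2) acc).length = acc.length := by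
    intro acc i
    induction List.range time.length generalizing acc with
    | nil => rfl
    | cons j js ihj => simp only [List.foldl_cons]; split <;> rw [ihj] <;> simp
  -- the outer fold with the inner fold replaced pointwise
  have houter :
      (List.range full_study_period.length).foldl (fun acc i =>
        (List.range time.length).foldl (fun acc2 j =>
          if full_study_period.getD i 0 = time.getD j 0 then
            acc2.set i (acc2.getD i 0 + flow.getD j 0) else acc2) acc)
        (List.replicate full_study_period.length value)
      = (List.range full_study_period.length).foldl (fun acc i =>
          acc.set i (acc.getD i 0 +
            ((List.range time.length).map (fun j =>
              if full_study_period.getD i 0 = time.getD j 0 then flow.getD j 0 else 0)).sum))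
          (List.replicate full_study_period.length value) := by
    have hpres : ∀ (is_ : List Nat) (acc : List Int),
        (∀ i ∈ is_, i < acc.length) →
        is_.foldl (fun acc i =>
          (List.range time.length).foldl (fun acc2 j =>
            if full_study_period.getD i 0 = time.getD j 0 then
              acc2.set i (acc2.getD i 0 + flow.getD j 0) else acc2) acc) acc
        = is_.foldl (fun acc i =>
            acc.set i (acc.getD i 0 +
              ((List.range time.length).map (fun j =>
                if full_study_period.getD i 0 = time.getD j 0 then flow.getD j 0 else 0)).sum)) acc := by
      intro is_
      induction is_ with
      | nil => intro acc _; rfl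
      | cons i is ihis =>
        intro acc hlt
        have hi : i < acc.length := hlt i (by simp)
        simp only [List.foldl_cons]
        rw [hinner acc i hi, ihis]
        intro x hx
        rw [List.length_set]
        exact hlt x (by simp [hx])
    apply hpres
    intro i hi
    simpa [List.length_replicate] using List.mem_range.mp hi
  rw [houter,
    outer_loop _ (List.range full_study_period.length) _ (List.nodup_range)
      (by intro i hi; simpa [List.length_replicate] using List.mem_range.mp hi) k]
  by_cases hk : k < full_study_period.length
  · rw [if_pos (List.mem_range.mpr hk)]
    rw [List.getElem?_map, List.getElem?_eq_getElem hk]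
    have hget : full_study_period.getD k 0 = full_study_period[k] := List.getD_eq_getElem _ _ hk
    have hmem : full_study_period[k] ∈ full_study_period := List.getElem_mem hk
    rw [List.getD_replicate _ hk, sum_range_eq_sum_zip full_study_period time flow hpre _ (hget ▸ hmem)]
    simp only [Option.map_some]
    rw [sumsDict_getD (time.zip flow) PySem.Dict.empty (full_study_period[k])]
    simp [hget, List.getElem?_eq_getElem hk]
  · rw [if_neg (by simpa using hk)]
    simp [List.getElem?_eq_none, hk, le_of_not_gt hk]

-- ===== VERDICT (by name: the statement is the Claim_ definition above) =====
theorem COMPLETE_STUDY_PERIOD_spec : Claim_equal_COMPLETE_STUDY_PERIOD := by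
  intro time fsp flow value _ hpre
  unfold Spec_COMPLETE_STUDY_PERIOD
  exact COMPLETE_STUDY_PERIOD_eq time fsp flow value hpre
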